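-- pv_equiv track=rewrite | github.com/Ace1928/eidosian_forge | archive_forge/code/func__iter_slices.py | _iter_slices
-- ===== SOURCE A (Python) =====
-- def _iter_slices(full_shape, num_slices, slice_dim):
--     """Slices a given a shape along the specified dimension."""
--     num_slices_with_excess = full_shape[slice_dim] % num_slices
--     offset = [0] * len(full_shape)
--     min_slice_len = full_shape[slice_dim] // num_slices
--     for i in range(num_slices):
--         shape = full_shape[:]
--         shape[slice_dim] = min_slice_len + bool(i < num_slices_with_excess)
--         yield (offset[:], shape)
--         offset[slice_dim] += shape[slice_dim]
-- ===== SOURCE B (Python) =====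
-- def _iter_slices(full_shape, num_slices, slice_dim):
--     """Slices a given shape along the specified dimension.
--
--     Offsets are computed in closed form instead of a running accumulator.
--     """
--     num_slices_with_excess = full_shape[slice_dim] % num_slices
--     min_slice_len = full_shape[slice_dim] // num_slices
--     for i in range(num_slices):
--         shape = full_shape[:]
--         shape[slice_dim] = min_slice_len + (1 if i < num_slices_with_excess else 0)
--         offset = [0] * len(full_shape)
--         offset[slice_dim] = i * min_slice_len + min(i, num_slices_with_excess)
--         yield (offset, shape)
-- ===== Notes on version B (the rewrite author's own statement) =====
-- stated objective: alternative
-- what changed: B drops A's mutable running offset accumulator and computes each slice's offset in closed form as i*min_slice_len + min(i, num_slices_with_excess), making every iteration independent.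
import Mathlib
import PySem

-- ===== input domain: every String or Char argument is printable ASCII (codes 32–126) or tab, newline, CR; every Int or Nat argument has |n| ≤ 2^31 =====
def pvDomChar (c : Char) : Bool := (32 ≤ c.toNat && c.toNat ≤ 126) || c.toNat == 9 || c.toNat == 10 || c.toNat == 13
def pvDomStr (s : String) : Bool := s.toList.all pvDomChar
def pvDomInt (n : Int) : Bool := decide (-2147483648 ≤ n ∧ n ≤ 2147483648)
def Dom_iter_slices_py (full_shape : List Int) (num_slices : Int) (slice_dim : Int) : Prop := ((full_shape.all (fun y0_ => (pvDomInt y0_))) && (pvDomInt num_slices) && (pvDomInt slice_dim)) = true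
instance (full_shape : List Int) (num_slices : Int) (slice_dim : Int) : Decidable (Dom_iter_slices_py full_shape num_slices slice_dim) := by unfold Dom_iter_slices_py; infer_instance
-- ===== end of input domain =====

-- B replaces A's running offset accumulator by a closed-form offset per slice; objective: alternative decomposition (same cost).
-- A is a generator; both ports return the list of yielded (offset, shape) pairs.

-- ===== PORT A =====
def iter_slices_py (full_shape : List Int) (num_slices : Int) (slice_dim : Int) : List (List Int × List Int) :=
  let excess := PySem.Int.mod (PySem.List.pyGetD full_shape slice_dim 0) num_slices
  let offset0 : List Int := List.replicate full_shape.length 0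
  let minLen := PySem.Int.floordiv (PySem.List.pyGetD full_shape slice_dim 0) num_slices
  ((PySem.List.pyRange 0 num_slices 1).foldl
    (fun st i =>
      let shape := PySem.List.pySetD full_shape slice_dim
        (minLen + (if i < excess then 1 else 0))
      (PySem.List.pySetD st.1 slice_dim
        (PySem.List.pyGetD st.1 slice_dim 0 + PySem.List.pyGetD shape slice_dim 0),
       st.2 ++ [(st.1, shape)]))
    (offset0, ([] : List (List Int × List Int)))).2

-- ===== PORT B =====
def iter_slices_py_alt (full_shape : List Int) (num_slices : Int) (slice_dim : Int) : List (List Int × List Int) :=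
  let excess := PySem.Int.mod (PySem.List.pyGetD full_shape slice_dim 0) num_slices
  let minLen := PySem.Int.floordiv (PySem.List.pyGetD full_shape slice_dim 0) num_slices
  (PySem.List.pyRange 0 num_slices 1).map (fun i =>
    (PySem.List.pySetD (List.replicate full_shape.length 0) slice_dim
       (i * minLen + min i excess),
     PySem.List.pySetD full_shape slice_dim
       (minLen + (if i < excess then 1 else 0))))

-- ===== PRECONDITION & SPEC =====
-- Pre_ excludes exactly the inputs where the Python A raises: slice_dim out of range (IndexError
-- on full_shape[slice_dim]) or num_slices = 0 (ZeroDivisionError).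
def Pre_iter_slices_py (full_shape : List Int) (num_slices : Int) (slice_dim : Int) : Prop :=
  PySem.Raise.InRange full_shape.length slice_dim ∧ num_slices ≠ 0

instance (full_shape : List Int) (num_slices : Int) (slice_dim : Int) : Decidable (Pre_iter_slices_py full_shape num_slices slice_dim) := by unfold Pre_iter_slices_py; infer_instance

def pvWitness_iter_slices_py : List Int × Int × Int := ([4, 7], 3, 1)

def Spec_iter_slices_py (full_shape : List Int) (num_slices : Int) (slice_dim : Int) (out : List (List Int × List Int)) : Prop := out = iter_slices_py_alt full_shape num_slices slice_dim
instance (full_shape : List Int) (num_slices : Int) (slice_dim : Int) (out : List (List Int × List Int)) : Decidable (Spec_iter_slices_py full_shape num_slices slice_dim out) := by unfold Spec_iter_slices_py; infer_instance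

-- ===== CLAIM (what is proved, stated in full; the proofs are below) =====
def Claim_equal_iter_slices_py : Prop := ∀ (full_shape : List Int) (num_slices : Int) (slice_dim : Int), Dom_iter_slices_py full_shape num_slices slice_dim → Pre_iter_slices_py full_shape num_slices slice_dim → Spec_iter_slices_py full_shape num_slices slice_dim (iter_slices_py full_shape num_slices slice_dim)

-- ===== LEMMAS AND PROOFS =====

-- normalized (Python) index
def pvNidx (n : Nat) (i : Int) : Nat := if 0 ≤ i then i.toNat else n - (-i).toNat

theorem pvNidx_lt {n : Nat} {i : Int} (h : PySem.Raise.InRange n i) : pvNidx n i < n := by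
  obtain ⟨h1, h2⟩ := h
  unfold pvNidx
  split_ifs <;> omega

theorem pvIdx_eq {n : Nat} {i : Int} (h : PySem.Raise.InRange n i) :
    PySem.List.pyIdx? n i = some (pvNidx n i) := by
  obtain ⟨h1, h2⟩ := h
  simp only [PySem.List.pyIdx?, pvNidx]
  split_ifs <;> rfl

theorem pvSetD_eq {xs : List Int} {i : Int} (v : Int)
    (h : PySem.Raise.InRange xs.length i) :
    PySem.List.pySetD xs i v = xs.set (pvNidx xs.length i) v := by
  simp [PySem.List.pySetD, PySem.List.pySet?, pvIdx_eq h]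

theorem pvGetD_eq {xs : List Int} {i : Int} (d : Int)
    (h : PySem.Raise.InRange xs.length i) :
    PySem.List.pyGetD xs i d = xs.getD (pvNidx xs.length i) d := by
  simp [PySem.List.pyGetD, PySem.List.pyGet?, pvIdx_eq h, List.getD]

theorem pvGetD_set {xs : List Int} {j : Nat} (hj : j < xs.length) (v d : Int) :
    (xs.set j v).getD j d = v := by
  simp [List.getD, List.getElem?_set_self hj]

-- A's loop body and B's per-slice output, named for the invariant lemma (proof helpers only)
def pvStepA (fs : List Int) (d minLen excess : Int)
    (st : List Int × List (List Int × List Int)) (i : Int) :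
    List Int × List (List Int × List Int) :=
  let shape := PySem.List.pySetD fs d (minLen + (if i < excess then 1 else 0))
  (PySem.List.pySetD st.1 d
      (PySem.List.pyGetD st.1 d 0 + PySem.List.pyGetD shape d 0),
   st.2 ++ [(st.1, shape)])

def pvOutB (fs : List Int) (d minLen excess : Int) (i : Int) : List Int × List Int :=
  (PySem.List.pySetD (List.replicate fs.length 0) d (i * minLen + min i excess),
   PySem.List.pySetD fs d (minLen + (if i < excess then 1 else 0)))

theorem pv_loop_inv (fs : List Int) (d minLen excess : Int)
    (hd : PySem.Raise.InRange fs.length d) (hex : 0 ≤ excess) (m : Nat) :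
    (PySem.List.pyRange 0 (m : Int) 1).foldl (pvStepA fs d minLen excess)
        (List.replicate fs.length 0, ([] : List (List Int × List Int))) =
      ((List.replicate fs.length 0).set (pvNidx fs.length d)
          ((m : Int) * minLen + min (m : Int) excess),
       (PySem.List.pyRange 0 (m : Int) 1).map (pvOutB fs d minLen excess)) := by
  have hlen : (List.replicate fs.length (0 : Int)).length = fs.length := by simp
  have hj : pvNidx fs.length d < fs.length := pvNidx_lt hd
  have hdz : PySem.Raise.InRange (List.replicate fs.length (0 : Int)).length d := by
    rw [hlen]; exact hd
  induction m with
  | zero =>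
      simp only [Nat.cast_zero, PySem.List.pyRange_one_eq_nil le_rfl, List.foldl_nil,
        List.map_nil]
      have : (0 : Int) * minLen + min (0 : Int) excess = 0 := by omega
      rw [this, List.set_replicate_self]
  | succ m ih =>
      have hm : (0 : Int) ≤ (m : Int) := by positivity
      have hcast : ((m + 1 : Nat) : Int) = (m : Int) + 1 := by push_cast; ring
      rw [hcast, PySem.List.pyRange_one_succ_right hm, List.foldl_append, List.map_append,
        ih, List.foldl_cons, List.foldl_nil]
      -- the state after m steps
      set zs := List.replicate fs.length (0 : Int) with hzs
      set j := pvNidx fs.length d with hjdef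
      have hlenset : (zs.set j ((m : Int) * minLen + min (m : Int) excess)).length = fs.length := by
        simp [hzs]
      have hdset : PySem.Raise.InRange
          (zs.set j ((m : Int) * minLen + min (m : Int) excess)).length d := by
        rw [hlenset]; exact hd
      have hlenfs : (fs.set j (minLen + (if (m : Int) < excess then 1 else 0))).length = fs.length := by
        simp
      have hdfs : PySem.Raise.InRange
          (fs.set j (minLen + (if (m : Int) < excess then 1 else 0))).length d := by
        rw [hlenfs]; exact hd
      simp only [pvStepA, pvOutB, List.map_cons, List.map_nil]
      rw [pvSetD_eq _ hd]
      rw [pvGetD_eq _ hdset, pvGetD_eq _ hdfs, pvSetD_eq _ hdz]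
      have hjn1 : pvNidx (zs.set j ((m : Int) * minLen + min (m : Int) excess)).length d = j := by
        rw [hlenset]
      have hjn2 : pvNidx (fs.set j (minLen + (if (m : Int) < excess then 1 else 0))).length d = j := by
        rw [hlenfs]
      rw [hjn1, hjn2]
      rw [pvSetD_eq _ (by rw [hlenset]; exact hd), hjn1, List.set_set]
      rw [pvGetD_set (by rw [hlen]; exact hj), pvGetD_set hj]
      have hnz : pvNidx zs.length d = j := by rw [hlen]
      rw [hnz]
      have hmin : min ((m : Int) + 1) excess =
          min (m : Int) excess + (if (m : Int) < excess then 1 else 0) := by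
        split_ifs <;> omega
      rw [add_one_mul, hmin]
      congr 2
      ring

theorem iter_slices_py_spec : Claim_equal_iter_slices_py := by
  intro fs n d _hdom hpre
  obtain ⟨hd, hn⟩ := hpre
  unfold Spec_iter_slices_py
  rcases lt_or_gt_of_ne hn with hneg | hpos
  · simp only [iter_slices_py, iter_slices_py_alt,
      PySem.List.pyRange_one_eq_nil (le_of_lt hneg), List.foldl_nil, List.map_nil]
  · obtain ⟨m, rfl⟩ : ∃ m : Nat, n = (m : Int) := ⟨n.toNat, by omega⟩
    have hex : (0 : Int) ≤ PySem.Int.mod (PySem.List.pyGetD fs d 0) (m : Int) := by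
      simp only [PySem.Int.mod]
      rw [Int.fmod_eq_emod, if_pos (Or.inl hpos.le), add_zero]
      exact Int.emod_nonneg _ (by omega)
    show ((PySem.List.pyRange 0 (m : Int) 1).foldl
        (pvStepA fs d (PySem.Int.floordiv (PySem.List.pyGetD fs d 0) (m : Int))
          (PySem.Int.mod (PySem.List.pyGetD fs d 0) (m : Int)))
        (List.replicate fs.length 0, ([] : List (List Int × List Int)))).2 =
      (PySem.List.pyRange 0 (m : Int) 1).map
        (pvOutB fs d (PySem.Int.floordiv (PySem.List.pyGetD fs d 0) (m : Int))
          (PySem.Int.mod (PySem.List.pyGetD fs d 0) (m : Int)))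
    rw [pv_loop_inv fs d _ _ hd hex m]
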